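-- pv_equiv track=rewrite | github.com/shynewsky/shynewsky | programmers/python/알고리즘kit/해시2_의상/의상.py | solution
-- ===== SOURCE A (Python) =====
-- def solution(clothes):
--
--     # 가공
--     dict = {}
--     for name, type in clothes:
--         if dict.get(type):
--             dict[type].append(name)
--         else:
--             dict[type] = [name]
--
--     # 코드
--     # 모든 경우의 수에서 '어떤 옷도 입지 않고 있는' 1을 빼면 되지 않을까
--
--     cum = 0
--     n = len(dict)
--     for key, value in dict.items():
--         cum += n * len(value)
--
--     return cum if n==1 else cum-1
-- ===== SOURCE B (Python) =====
-- def solution(clothes):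
--     # sort the types, then count distinct types as length minus the number of
--     # equal adjacent pairs in the sorted order; answer is the closed form
--     # n*total (minus 1 unless a single type).
--     ts = sorted(t for _, t in clothes)
--     dup = sum(1 for a, b in zip(ts, ts[1:]) if a == b)
--     n = len(ts) - dup
--     return n * len(clothes) if n == 1 else n * len(clothes) - 1
-- ===== Notes on version B (the rewrite author's own statement) =====
-- stated objective: alternative
-- what changed: Replaced the dict-of-lists grouping and per-type summation loop by sort-then-scan: sort the types, count distinct types as length minus the number of equal adjacent pairs, and return the closed form n*total (minus 1 unless n==1).
import Mathlib
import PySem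

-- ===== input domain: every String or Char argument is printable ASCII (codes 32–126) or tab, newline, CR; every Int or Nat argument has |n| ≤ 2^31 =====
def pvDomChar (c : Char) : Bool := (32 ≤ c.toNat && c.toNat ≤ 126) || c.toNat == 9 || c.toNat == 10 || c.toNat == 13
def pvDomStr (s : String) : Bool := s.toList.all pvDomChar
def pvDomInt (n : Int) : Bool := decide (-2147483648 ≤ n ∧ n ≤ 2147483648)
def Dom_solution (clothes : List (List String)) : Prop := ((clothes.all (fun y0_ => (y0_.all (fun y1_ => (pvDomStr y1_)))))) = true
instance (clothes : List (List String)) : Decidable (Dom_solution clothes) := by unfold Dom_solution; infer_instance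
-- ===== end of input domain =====

-- B replaces A's dict-of-lists grouping and per-type summation loop by sort-then-scan:
-- sort the types, count distinct types as length minus the number of equal adjacent
-- pairs, then return the closed form n*total (minus 1 unless n==1): alternative algorithm.

-- ===== PORT A =====
-- one iteration of A's grouping loop ('for name, type in clothes: …'); a row that is not a
-- 2-element list makes Python raise (excluded by Pre_), the port leaves the dict unchanged there
def pvStepA (d : PySem.Dict String (List String)) (c : List String) :
    PySem.Dict String (List String) :=
  match c with
  | [name, ty] =>
    match d.get? ty with
    | some v => if v.isEmpty then d.insert ty [name] else d.insert ty (v ++ [name])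
    | none => d.insert ty [name]
  | _ => d

def solution (clothes : List (List String)) : Int :=
  let d := clothes.foldl pvStepA PySem.Dict.empty
  let n : Int := d.size
  let cum := d.items.foldl (fun cum p => cum + n * (p.2.length : Int)) 0
  if n == 1 then cum else cum - 1

-- ===== PORT B =====
def solution_alt (clothes : List (List String)) : Int :=
  -- ts = sorted(t for _, t in clothes); a non-2-element row raises (excluded by Pre_)
  let ts := PySem.List.sorted (clothes.map (fun c => PySem.List.pyGetD c 1 "")) (fun t => t) false
  -- dup = sum(1 for a, b in zip(ts, ts[1:]) if a == b)
  let dup : Int := (ts.zip (PySem.List.slice ts (some 1) none)).foldl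
      (fun acc p => if p.1 == p.2 then acc + 1 else acc) 0
  let n : Int := (ts.length : Int) - dup
  if n == 1 then n * (clothes.length : Int) else n * (clothes.length : Int) - 1

-- ===== PRECONDITION & SPEC =====
-- Pre_ excludes rows that are not 2-element lists: Python A (and B) raise ValueError unpacking them.
def Pre_solution (clothes : List (List String)) : Prop := ∀ c ∈ clothes, c.length = 2
instance (clothes : List (List String)) : Decidable (Pre_solution clothes) := by
  unfold Pre_solution; infer_instance

def pvWitness_solution : List (List String) := [["a", "shirt"], ["b", "pants"], ["c", "shirt"]]

def Spec_solution (clothes : List (List String)) (out : Int) : Prop := out = solution_alt clothes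
instance (clothes : List (List String)) (out : Int) : Decidable (Spec_solution clothes out) := by
  unfold Spec_solution; infer_instance

-- ===== CLAIM (what is proved, stated in full; the proofs are below) =====
def Claim_equal_solution : Prop := ∀ (clothes : List (List String)),
  Dom_solution clothes → Pre_solution clothes → Spec_solution clothes (solution clothes)

-- ===== LEMMAS AND PROOFS =====

-- On a 2-element row, A's check-get-then-insert step is exactly a modify-append at the type key.
theorem pvStepA_eq_modify (d : PySem.Dict String (List String)) (c : List String)
    (h : c.length = 2) :
    pvStepA d c = d.modify (PySem.List.pyGetD c 1 "") []
      (fun v => v ++ [PySem.List.pyGetD c 0 ""]) := by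
  match c, h with
  | [a, b], _ =>
    show pvStepA d [a, b] = d.modify b [] (fun v => v ++ [a])
    simp only [pvStepA, PySem.Dict.modify, PySem.Dict.getD]
    cases hg : d.get? b with
    | none => simp
    | some v =>
      cases v with
      | nil => simp
      | cons x xs => simp

-- sum of multiplicities over the set of elements is the length
theorem pvSum_counts (ts : List String) :
    ((PySem.Set.ofList ts).map (fun k => ts.count k)).sum = ts.length := by
  have hperm : (PySem.Set.ofList ts).Perm ts.dedup := by
    refine (List.perm_ext_iff_of_nodup (PySem.Set.nodup_ofList ts) ts.nodup_dedup).mpr ?_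
    intro x
    rw [PySem.Set.mem_ofList, List.mem_dedup]
  calc ((PySem.Set.ofList ts).map (fun k => ts.count k)).sum
      = (ts.dedup.map (fun k => ts.count k)).sum := (hperm.map _).sum_eq
    _ = ts.length := List.sum_map_count_dedup_eq_length ts

theorem pvFilter_len (l : List (String × String)) (k : String) :
    (l.filter (fun p => p.1 == k)).length = (l.map (·.1)).count k := by
  rw [List.count, ← List.countP_eq_length_filter, List.countP_map]; rfl

-- distinct-element count of a list, as the length of its PySem set
theorem pvSetLen (l : List String) : (PySem.Set.ofList l).length = l.toFinset.card := by
  have hfs : (PySem.Set.ofList l).toFinset = l.toFinset := by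
    ext x; simp [PySem.Set.mem_ofList]
  rw [← List.toFinset_card_of_nodup (PySem.Set.nodup_ofList l), hfs]

-- on a (≤)-sorted list, equal adjacent pairs + distinct elements = length
theorem pvAdj : ∀ (l : List String), l.Pairwise (· ≤ ·) →
    (l.zip l.tail).countP (fun p => p.1 == p.2) + l.toFinset.card = l.length
  | [], _ => by simp
  | [x], _ => by simp
  | x :: y :: rest, h => by
    have hx : ∀ z ∈ y :: rest, x ≤ z := fun z hz => List.rel_of_pairwise_cons h hz
    have ih := pvAdj (y :: rest) h.tail
    have hzip : ((x :: y :: rest).zip (x :: y :: rest).tail)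
        = (x, y) :: ((y :: rest).zip (y :: rest).tail) := by simp
    rw [hzip, List.countP_cons]
    by_cases hxy : x = y
    · have hcard : (x :: y :: rest).toFinset.card = (y :: rest).toFinset.card := by
        simp [List.toFinset_cons, hxy]
      have hb : ((x, y).1 == (x, y).2) = true := by simp [hxy]
      rw [hcard, hb]
      simp only [List.length_cons] at ih
      simp only [List.length_cons, if_true]
      omega
    · have hxy' : x < y := lt_of_le_of_ne (hx y (.head _)) hxy
      have hnot : x ∉ y :: rest := by
        intro hmem
        rcases List.mem_cons.mp hmem with h1 | h2
        · exact hxy h1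
        · exact absurd (List.rel_of_pairwise_cons h.tail h2) (not_le.mpr hxy')
      have hcard : (x :: y :: rest).toFinset.card = (y :: rest).toFinset.card + 1 := by
        rw [List.toFinset_cons,
          Finset.card_insert_of_notMem (fun hm => hnot (List.mem_toFinset.mp hm))]
      have hb : ((x, y).1 == (x, y).2) = false := by simp [hxy]
      rw [hb, hcard]
      simp only [List.length_cons] at ih
      simp only [List.length_cons, Bool.false_eq_true, if_false]
      omega

theorem solution_spec' (clothes : List (List String)) (h : Pre_solution clothes) :
    solution clothes = solution_alt clothes := by
  -- ---- A's side reduces to the closed form over N = #distinct types ----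
  have hfold : clothes.foldl pvStepA PySem.Dict.empty
      = (clothes.map (fun c => (PySem.List.pyGetD c 1 "", PySem.List.pyGetD c 0 ""))).foldl
          (fun d p => d.modify p.1 [] (fun v => v ++ [p.2])) PySem.Dict.empty := by
    rw [List.foldl_map]
    exact PySem.List.foldl_congr_mem _ _ _ _ (fun acc x hx => pvStepA_eq_modify acc x (h x hx))
  set l := clothes.map (fun c => (PySem.List.pyGetD c 1 "", PySem.List.pyGetD c 0 "")) with hl
  set ts := l.map (·.1) with hts
  set d := l.foldl (fun d p => d.modify p.1 [] (fun v => v ++ [p.2])) PySem.Dict.empty with hd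
  have hkeys : d.keys = PySem.Set.ofList ts := by
    rw [hd, PySem.Dict.keys_foldl_modify_key l Prod.fst [] (fun _ p v => v ++ [p.2]),
      PySem.Dict.keys_empty, PySem.Set.update_nil_left, hts]
  have hnd : d.keys.Nodup := by rw [hkeys]; exact PySem.Set.nodup_ofList _
  have hget : ∀ k, (d.getD k []).length = ts.count k := by
    intro k
    rw [hd, PySem.Dict.getD_foldl_modify_append, PySem.Dict.getD_empty, List.nil_append,
      List.length_map, pvFilter_len, hts]
  have hn : d.size = d.keys.length := by
    simp [PySem.Dict.size, PySem.Dict.keys]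
  have hlen : ts.length = clothes.length := by rw [hts, hl]; simp
  have hcum : d.items.foldl (fun cum p => cum + (d.size : Int) * (p.2.length : Int)) 0
      = (d.size : Int) * (clothes.length : Int) := by
    rw [PySem.Dict.items_eq_map_keys d hnd [], List.foldl_map, PySem.List.foldl_add, zero_add]
    have : (d.keys.map (fun k => (d.size : Int) * (((k, d.getD k []).2.length : Nat) : Int))).sum
        = (d.keys.map (fun k => (d.size : Int) * ((ts.count k : Nat) : Int))).sum := by
      congr 1
      exact List.map_congr_left (fun k _ => by rw [hget k])
    rw [this, List.sum_map_mul_left]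
    have hcast : (d.keys.map (fun k => ((ts.count k : Nat) : Int))).sum
        = (((d.keys.map (fun k => ts.count k)).sum : Nat) : Int) := by
      rw [Nat.cast_list_sum, List.map_map]; rfl
    rw [hcast, hkeys, pvSum_counts, hlen]
  -- ---- B's side reduces to the same closed form ----
  have hts0 : clothes.map (fun c => PySem.List.pyGetD c 1 "") = ts := by
    rw [hts, hl, List.map_map]; rfl
  set st := PySem.List.sorted ts (fun t => t) false with hst
  have hperm : st.Perm ts := PySem.List.sorted_perm ts (fun t => t) false
  have hdup : (st.zip (PySem.List.slice st (some 1) none)).foldl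
      (fun acc p => if p.1 == p.2 then acc + 1 else acc) 0
      = ((st.zip st.tail).countP (fun p => p.1 == p.2) : Int) := by
    rw [PySem.List.slice_from_one, PySem.List.foldl_count_if, zero_add]
  have hadj := pvAdj st (PySem.List.sorted_pairwise ts (fun t => t))
  have hcard : st.toFinset.card = (PySem.Set.ofList ts).length := by
    rw [List.toFinset_eq_of_perm st ts hperm, pvSetLen]
  have hstlen : st.length = ts.length := hperm.length_eq
  have hB : solution_alt clothes
      = (if ((PySem.Set.ofList ts).length : Int) == 1
         then ((PySem.Set.ofList ts).length : Int) * (clothes.length : Int)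
         else ((PySem.Set.ofList ts).length : Int) * (clothes.length : Int) - 1) := by
    show (let ts' := PySem.List.sorted (clothes.map (fun c => PySem.List.pyGetD c 1 ""))
            (fun t => t) false
          let dup : Int := (ts'.zip (PySem.List.slice ts' (some 1) none)).foldl
              (fun acc p => if p.1 == p.2 then acc + 1 else acc) 0
          let n : Int := (ts'.length : Int) - dup
          if n == 1 then n * (clothes.length : Int) else n * (clothes.length : Int) - 1) = _
    rw [hts0]
    show (if ((st.length : Int) - (st.zip (PySem.List.slice st (some 1) none)).foldl
              (fun acc p => if p.1 == p.2 then acc + 1 else acc) 0) == 1 then _ else _) = _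
    rw [hdup]
    have hnval : (st.length : Int) - ((st.zip st.tail).countP (fun p => p.1 == p.2) : Int)
        = ((PySem.Set.ofList ts).length : Int) := by
      rw [← hcard]
      omega
    rw [hnval]
  -- ---- assemble ----
  rw [hB]
  show (let d' := clothes.foldl pvStepA PySem.Dict.empty
        let n : Int := d'.size
        let cum := d'.items.foldl (fun cum p => cum + n * (p.2.length : Int)) 0
        if n == 1 then cum else cum - 1) = _
  rw [hfold]
  show (if (d.size : Int) == 1 then
          d.items.foldl (fun cum p => cum + (d.size : Int) * (p.2.length : Int)) 0
        else d.items.foldl (fun cum p => cum + (d.size : Int) * (p.2.length : Int)) 0 - 1) = _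
  rw [hcum]
  have hsz : (d.size : Int) = ((PySem.Set.ofList ts).length : Int) := by
    rw [hn, hkeys]
  rw [hsz]

-- ===== VERDICT (by name: the statement is the Claim_ definition above) =====
theorem solution_spec : Claim_equal_solution := by
  intro clothes _ hpre
  exact solution_spec' clothes hpre
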